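-- pv_equiv track=rewrite | github.com/djordje3d/APIPostgreSql | app/config.py | _normalize_and_validate_cors_origins
-- ===== SOURCE A (Python) =====
-- def _is_valid_cors_origin(origin: str) -> bool:
--     """Origin must be http(s) only, no path, no spaces, no wildcard."""
--     if not origin or " " in origin or "*" in origin:
--         return False
--     if not (origin.startswith("http://") or origin.startswith("https://")):
--         return False
--     # No path: after "://", rest must be host[:port] only (no slash)
--     after_scheme = origin.split("://", 1)[-1]
--     if "/" in after_scheme:
--         return False
--     return True
--
-- def _normalize_and_validate_cors_origins(raw: str) -> tuple[list[str], list[str]]: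
--     """Parse CORS_ORIGINS, normalize (strip), validate. Returns (valid, invalid)."""
--     entries = [o.strip() for o in raw.split(",") if o.strip()]
--     valid: list[str] = []
--     invalid: list[str] = []
--     seen: set[str] = set()
--     for o in entries:
--         normalized = o.rstrip("/")
--         if not _is_valid_cors_origin(normalized):
--             invalid.append(o)
--             continue
--         if normalized not in seen:
--             seen.add(normalized)
--             valid.append(normalized)
--     return valid, invalid
-- ===== SOURCE B (Python) =====
-- def _is_valid_cors_origin(origin: str) -> bool:
--     """Origin must be http(s) only, no path, no spaces, no wildcard."""
--     if not origin or " " in origin or "*" in origin: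
--         return False
--     if not (origin.startswith("http://") or origin.startswith("https://")):
--         return False
--     after_scheme = origin.split("://", 1)[-1]
--     if "/" in after_scheme:
--         return False
--     return True
--
-- def _normalize_and_validate_cors_origins(raw: str) -> tuple[list[str], list[str]]:
--     """Parse CORS_ORIGINS, normalize (strip), validate. Returns (valid, invalid)."""
--     def go(parts):
--         # recurse on the comma-separated parts, building both result lists back-to-front
--         if not parts:
--             return [], []
--         o = parts[0].strip()
--         valid, invalid = go(parts[1:])
--         if not o:
--             return valid, invalid
--         n = o
--         while n.endswith("/"):
--             n = n[:-1]
--         if not _is_valid_cors_origin(n):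
--             return valid, [o] + invalid
--         # keep-first dedup: prepend n and drop any later duplicate from the tail result
--         return [n] + [v for v in valid if v != n], invalid
--     return go(raw.split(","))
-- ===== Notes on version B (the rewrite author's own statement) =====
-- stated objective: alternative
-- what changed: Replaced A's single left-to-right accumulating loop with a running seen-set by a back-to-front recursion over the comma-separated parts that builds both result lists by prepending, deduplicating valid origins by filtering later duplicates out of the tail result instead of keeping a seen set.
import Mathlib
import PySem

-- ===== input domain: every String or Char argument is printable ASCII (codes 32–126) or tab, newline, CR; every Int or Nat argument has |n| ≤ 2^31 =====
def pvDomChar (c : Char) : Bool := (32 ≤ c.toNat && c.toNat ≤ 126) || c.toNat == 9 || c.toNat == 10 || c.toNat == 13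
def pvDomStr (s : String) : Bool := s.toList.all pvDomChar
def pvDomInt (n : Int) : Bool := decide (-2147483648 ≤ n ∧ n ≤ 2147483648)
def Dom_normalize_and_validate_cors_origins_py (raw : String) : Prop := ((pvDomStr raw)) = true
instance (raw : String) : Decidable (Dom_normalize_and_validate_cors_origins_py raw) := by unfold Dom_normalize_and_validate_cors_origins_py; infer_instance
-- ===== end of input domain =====

-- B replaces A's single left-to-right accumulating loop (running seen-set) by a
-- back-to-front recursion over the comma-separated parts that dedups by prepending
-- and filtering the tail result (objective: simpler decomposition; same cost).


-- ===== PORT A =====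
-- shared helper, identical in both Python sources: _is_valid_cors_origin
-- (origin.split("://", 1)[-1] → pyGet? … (-1); the split result is always nonempty, so getD "" never fires)
def pvIsValidCorsOrigin (origin : String) : Bool :=
  if origin == "" || PySem.Str.isIn " " origin || PySem.Str.isIn "*" origin then false
  else if !(PySem.Str.startswith origin "http://" || PySem.Str.startswith origin "https://") then false
  else
    let after_scheme := (PySem.List.pyGet? ((PySem.Str.splitMax? origin "://" 1).getD []) (-1)).getD ""
    if PySem.Str.isIn "/" after_scheme then false else true

-- hand port of A's o.rstrip("/") (PySem has no rstrip-with-chars): drop trailing '/' characters; exact on all strings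
def pvRstripSlash (s : String) : String :=
  String.ofList ((s.toList.reverse.dropWhile (fun c => c == '/')).reverse)

-- entries = [o.strip() for o in raw.split(",") if o.strip()]
def pvEntries (raw : String) : List String :=
  ((PySem.Str.split? raw ",").getD []).filterMap
    (fun o => let s := PySem.Str.strip o; if s == "" then none else some s)

-- A's for-loop over entries with accumulators valid / invalid / seen
def pvCorsLoop : List String → List String → List String → PySem.Set String → List String × List String
  | [], valid, invalid, _ => (valid, invalid)
  | o :: rest, valid, invalid, seen =>
    let normalized := pvRstripSlash o
    if !pvIsValidCorsOrigin normalized then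
      pvCorsLoop rest valid (invalid ++ [o]) seen
    else if seen.contains normalized then
      pvCorsLoop rest valid invalid seen
    else
      pvCorsLoop rest (valid ++ [normalized]) invalid (PySem.Set.add seen normalized)

def normalize_and_validate_cors_origins_py (raw : String) : List String × List String :=
  pvCorsLoop (pvEntries raw) [] [] PySem.Set.empty

-- ===== PORT B =====
-- port of B's  `while n.endswith("/"): n = n[:-1]`  — run on the reversed char list,
-- where dropping the last char is dropping the head; exact on all strings
def altChopRev : List Char → List Char
  | [] => []
  | c :: cs => if c == '/' then altChopRev cs else c :: cs

def altRstrip (s : String) : String := String.ofList (altChopRev s.toList.reverse).reverse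

-- B's inner recursion go(parts): recurse on the tail, then handle parts[0] in front
def altGo : List String → List String × List String
  | [] => ([], [])
  | head :: rest =>
    let o := PySem.Str.strip head
    let vi := altGo rest
    if o == "" then vi
    else
      let n := altRstrip o
      if !pvIsValidCorsOrigin n then (vi.1, o :: vi.2)
      else (n :: vi.1.filter (fun v => v != n), vi.2)

def normalize_and_validate_cors_origins_py_alt (raw : String) : List String × List String :=
  altGo ((PySem.Str.split? raw ",").getD [])

-- ===== PRECONDITION & SPEC =====
def Spec_normalize_and_validate_cors_origins_py (raw : String) (out : List String × List String) : Prop := out = normalize_and_validate_cors_origins_py_alt raw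
instance (raw : String) (out : List String × List String) : Decidable (Spec_normalize_and_validate_cors_origins_py raw out) := by unfold Spec_normalize_and_validate_cors_origins_py; infer_instance

-- ===== CLAIM (what is proved, stated in full; the proofs are below) =====
def Claim_equal_normalize_and_validate_cors_origins_py : Prop := ∀ (raw : String), Dom_normalize_and_validate_cors_origins_py raw → Spec_normalize_and_validate_cors_origins_py raw (normalize_and_validate_cors_origins_py raw)

-- ===== LEMMAS AND PROOFS =====

-- keep-first dedup written right-to-left (the shape of B's valid-list construction)
def rdedup : List String → List String
  | [] => []
  | n :: t => n :: (rdedup t).filter (fun v => v != n)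

-- B's rstrip loop equals A's dropWhile formulation
theorem altChopRev_eq (l : List Char) : altChopRev l = l.dropWhile (fun c => c == '/') := by
  induction l with
  | nil => rfl
  | cons c cs ih =>
    cases h : c == '/' <;> simp [altChopRev, h, ih, List.dropWhile]

theorem altRstrip_eq (s : String) : altRstrip s = pvRstripSlash s := by
  simp [altRstrip, pvRstripSlash, altChopRev_eq]

-- folding Set.add (A's seen/valid accumulation) is the same as rdedup past an accumulator
theorem foldl_add_eq_rdedup (t : List String) : ∀ acc : List String,
    t.foldl PySem.Set.add acc = acc ++ (rdedup t).filter (fun y => !acc.contains y) := by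
  induction t with
  | nil => intro acc; simp [rdedup]
  | cons x t ih =>
    intro acc
    by_cases hx : x ∈ acc
    · have hc : PySem.Set.add acc x = acc := by simp [PySem.Set.add, PySem.Set.contains, hx]
      simp only [List.foldl_cons, hc, ih, rdedup, List.filter_cons]
      simp [List.filter_filter, hx]
      apply List.filter_congr; intro a _; by_cases hax : a = x <;> simp [hax, hx]
    · have hc : PySem.Set.add acc x = acc ++ [x] := by simp [PySem.Set.add, PySem.Set.contains, hx]
      simp only [List.foldl_cons, hc, ih, rdedup, List.filter_cons]
      simp [hx, List.contains_eq_mem, List.append_assoc]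
      apply List.filter_congr
      intro a _
      by_cases hax : a = x <;> simp [hax]
    
-- A's loop invariant: seen is exactly the list of valid origins collected so far
theorem pvCorsLoop_eq (entries : List String) : ∀ (valid invalid : List String),
    pvCorsLoop entries valid invalid valid =
      (List.foldl PySem.Set.add valid
        ((entries.filter (fun o => pvIsValidCorsOrigin (pvRstripSlash o))).map pvRstripSlash),
       invalid ++ entries.filter (fun o => !pvIsValidCorsOrigin (pvRstripSlash o))) := by
  induction entries with
  | nil => intro valid invalid; simp [pvCorsLoop]
  | cons o rest ih =>
    intro valid invalid
    by_cases h : pvIsValidCorsOrigin (pvRstripSlash o)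
    · by_cases hm : pvRstripSlash o ∈ valid
      · simp [pvCorsLoop, h, hm, ih, PySem.Set.add]
      · simp [pvCorsLoop, h, hm, PySem.Set.add, ih]
    · simp [pvCorsLoop, h, ih, List.append_assoc]

-- B's recursion computes rdedup of the good normalized entries and the filter of the bad ones
theorem altGo_eq (parts : List String) :
    altGo parts =
      (rdedup (((parts.filterMap (fun o => let s := PySem.Str.strip o; if s == "" then none else some s)).filter
          (fun o => pvIsValidCorsOrigin (pvRstripSlash o))).map pvRstripSlash),
       (parts.filterMap (fun o => let s := PySem.Str.strip o; if s == "" then none else some s)).filter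
          (fun o => !pvIsValidCorsOrigin (pvRstripSlash o))) := by
  induction parts with
  | nil => rfl
  | cons head rest ih =>
    by_cases he : PySem.Str.strip head = ""
    · simp [altGo, he, ih]
    · by_cases h : pvIsValidCorsOrigin (pvRstripSlash (PySem.Str.strip head))
      · simp [altGo, he, h, ih, altRstrip_eq, rdedup]
      · simp [altGo, he, h, ih, altRstrip_eq]

-- ===== VERDICT (by name: the statement is the Claim_ definition above) =====
theorem normalize_and_validate_cors_origins_py_spec : Claim_equal_normalize_and_validate_cors_origins_py := by
  intro raw _
  unfold Spec_normalize_and_validate_cors_origins_py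
  unfold normalize_and_validate_cors_origins_py normalize_and_validate_cors_origins_py_alt
  rw [show (PySem.Set.empty : PySem.Set String) = ([] : List String) from rfl]
  rw [pvCorsLoop_eq, altGo_eq]
  rw [foldl_add_eq_rdedup]
  simp [pvEntries]
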